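-- pv_equiv track=rewrite | github.com/phenomenalCode/dataops-formatter | formatter_core.py | format_table_header
-- ===== SOURCE A (Python) =====
-- sm_column_pad = 20
--
-- med_column_pad = 50
--
-- lg_column_pad = 100
--
-- def pad_column_width(value):
--     l = len(value)
--     if l < sm_column_pad:
--         l = sm_column_pad
--     elif l < med_column_pad:
--         l = med_column_pad
--     else:
--         l = lg_column_pad
--
--     #ljust function did not work after replacing the space with underscore,
--     #have not understood why just yet
--     #val_space = val.ljust(l,'-')
--     #work around to ljust failures
--     padded_value = value.ljust(l,'_')
--     return padded_value
--
-- def format_table_header(line_input):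
--     row = ""
--     val = ""
--     i = 0
--     while i < len(line_input):
--         c = line_input[i]
--         if c != ',':
--             #special column header formatting to replace all spaces between words with an underscore
--             if c == ' ':
--                 c = '_'
--             val += c
--         else:
--             row += pad_column_width(val)
--             val= ""
--         i = i+1
--     #end loop
--     if val:
--         row += pad_column_width(val)
--     return row
-- ===== SOURCE B (Python) =====
-- sm_column_pad = 20
--
-- med_column_pad = 50
--
-- lg_column_pad = 100
--
-- def pad_column_width(value):
--     l = len(value)
--     if l < sm_column_pad:
--         l = sm_column_pad
--     elif l < med_column_pad:
--         l = med_column_pad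
--     else:
--         l = lg_column_pad
--     return value.ljust(l, '_')
--
-- def format_table_header(line_input):
--     fields = line_input.split(',')
--     if fields[-1] == '':
--         fields.pop()
--     return ''.join(pad_column_width(f.replace(' ', '_')) for f in fields)
-- ===== Notes on version B (the rewrite author's own statement) =====
-- stated objective: simpler
-- what changed: Replaces the index-based character loop with two string accumulators built by repeated concatenation by a split on comma, dropping one trailing empty field, then joining the padded underscore-mapped fields.
import Mathlib
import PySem

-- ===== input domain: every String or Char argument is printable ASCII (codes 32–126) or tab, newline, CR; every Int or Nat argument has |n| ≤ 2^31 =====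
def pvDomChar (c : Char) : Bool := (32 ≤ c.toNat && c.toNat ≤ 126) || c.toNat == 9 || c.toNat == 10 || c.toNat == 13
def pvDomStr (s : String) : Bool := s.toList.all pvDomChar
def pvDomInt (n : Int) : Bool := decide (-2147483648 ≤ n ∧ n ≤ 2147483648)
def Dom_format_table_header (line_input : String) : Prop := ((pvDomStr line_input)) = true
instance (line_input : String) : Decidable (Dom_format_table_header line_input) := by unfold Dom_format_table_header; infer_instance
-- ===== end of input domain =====

-- B replaces A's index-based character loop (two mutable accumulators) by split-on-comma,
-- dropping the single trailing empty field, and joining the padded underscore-mapped fields.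

-- shared helper: both Pythons contain the identical pad_column_width (value.ljust(l, '_'))
def pad_column_width (v : List Char) : List Char :=
  let n := v.length
  let l := if n < 20 then 20 else if n < 50 then 50 else 100
  v ++ List.replicate (l - n) '_'

-- ===== PORT A =====
-- A's while-loop over line_input[i] as structural recursion over the characters,
-- with the same two accumulators row and val.
def fthLoopA : List Char → List Char → List Char → List Char
  | [], row, val => if val ≠ [] then row ++ pad_column_width val else row
  | c :: cs, row, val =>
    if c ≠ ',' then fthLoopA cs row (val ++ [if c = ' ' then '_' else c])
    else fthLoopA cs (row ++ pad_column_width val) []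

def format_table_header (line_input : String) : String :=
  String.ofList (fthLoopA line_input.toList [] [])

-- ===== PORT B =====
-- f.replace(' ', '_') with single-character arguments is exactly a per-character map
def replUnd (c : Char) : Char := if c = ' ' then '_' else c

def format_table_header_alt (line_input : String) : String :=
  let fields := List.splitOn ',' line_input.toList
  let fields := if fields.getLast? = some [] then fields.dropLast else fields
  String.ofList (List.flatten (fields.map (fun f => pad_column_width (f.map replUnd))))

-- ===== PRECONDITION & SPEC =====
def Spec_format_table_header (line_input : String) (out : String) : Prop := out = format_table_header_alt line_input
instance (line_input : String) (out : String) : Decidable (Spec_format_table_header line_input out) := by unfold Spec_format_table_header; infer_instance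

-- ===== CLAIM (what is proved, stated in full; the proofs are below) =====
def Claim_equal_format_table_header : Prop := ∀ (line_input : String), Dom_format_table_header line_input → Spec_format_table_header line_input (format_table_header line_input)

-- ===== LEMMAS AND PROOFS =====

-- proof-only helpers
def dropTrail (fs : List (List Char)) : List (List Char) :=
  if fs.getLast? = some [] then fs.dropLast else fs

def emitP (fs : List (List Char)) : List Char :=
  (List.map pad_column_width (dropTrail fs)).flatten

def consFirst (v : List Char) : List (List Char) → List (List Char)
  | [] => [v]
  | f :: r => (v ++ f) :: r

theorem splitOn_ne_nil (cs : List Char) : List.splitOn ',' cs ≠ [] :=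
  List.splitOnP_ne_nil (· == ',') cs

theorem dropTrail_cons (v : List Char) (M : List (List Char)) (h : M ≠ []) :
    dropTrail (v :: M) = v :: dropTrail M := by
  unfold dropTrail
  cases M with
  | nil => exact absurd rfl h
  | cons f r =>
      simp only [List.getLast?_cons_cons]
      split <;> rfl

theorem emitP_cons (v : List Char) (M : List (List Char)) (h : M ≠ []) :
    emitP (v :: M) = pad_column_width v ++ emitP M := by
  simp [emitP, dropTrail_cons v M h]

theorem emitP_single (v : List Char) :
    emitP [v] = if v ≠ [] then pad_column_width v else [] := by
  by_cases h : v = [] <;> simp [emitP, dropTrail, h]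

theorem consFirst_nil (M : List (List Char)) (h : M ≠ []) : consFirst [] M = M := by
  cases M with
  | nil => exact absurd rfl h
  | cons f r => simp [consFirst]

theorem fthLoopA_eq (cs : List Char) : ∀ (row v : List Char),
    fthLoopA cs row v
      = row ++ emitP (consFirst v ((List.splitOn ',' cs).map (List.map replUnd))) := by
  induction cs with
  | nil =>
      intro row v
      have h0 : (List.splitOn ',' ([] : List Char)).map (List.map replUnd) = [[]] := by
        simp [List.splitOn, List.splitOnP_nil]
      rw [h0]
      simp only [consFirst, List.append_nil]
      rw [emitP_single]
      by_cases h : v = [] <;> simp [fthLoopA, h]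
  | cons c cs ih =>
      intro row v
      by_cases hc : c = ','
      · subst hc
        rw [List.splitOn, List.splitOnP_cons]
        simp only [beq_self_eq_true, if_true]
        rw [show fthLoopA (',' :: cs) row v = fthLoopA cs (row ++ pad_column_width v) [] from by
              simp [fthLoopA]]
        rw [ih]
        obtain ⟨f, r, hM⟩ : ∃ f r, (List.splitOn ',' cs).map (List.map replUnd) = f :: r := by
          cases h : (List.splitOn ',' cs).map (List.map replUnd) with
          | nil => exact absurd h (by simpa using splitOn_ne_nil cs)
          | cons f r => exact ⟨f, r, rfl⟩
        rw [List.map_cons, hM]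
        have h2 : List.splitOnP (fun x => x == ',') cs = List.splitOn ',' cs := rfl
        simp [consFirst, h2, hM, emitP_cons v (f :: r) (by simp), List.append_assoc]
      · rw [List.splitOn, List.splitOnP_cons]
        have hbeq : (c == ',') = false := by simpa using hc
        simp only [hbeq]
        rw [show fthLoopA (c :: cs) row v
              = fthLoopA cs row (v ++ [if c = ' ' then '_' else c]) from by
              simp [fthLoopA, hc]]
        rw [ih]
        cases hS : List.splitOnP (· == ',') cs with
        | nil => exact absurd hS (by simpa [List.splitOn] using splitOn_ne_nil cs)
        | cons f r =>
            simp [List.splitOn, hS, consFirst, replUnd, List.append_assoc]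

theorem dropTrail_map (fs : List (List Char)) :
    dropTrail (fs.map (List.map replUnd)) = (dropTrail fs).map (List.map replUnd) := by
  unfold dropTrail
  cases h : fs.getLast? with
  | none =>
      have : fs = [] := by simpa using h
      simp [this]
  | some last =>
      have hm : (fs.map (List.map replUnd)).getLast? = some (last.map replUnd) := by
        simp [List.getLast?_map, h]
      by_cases hl : last = []
      · simp [hm, hl, List.map_dropLast]
      · have : ¬ last.map replUnd = [] := by simpa using hl
        simp [hm, hl, this]

-- ===== VERDICT (by name: the statement is the Claim_ definition above) =====
theorem format_table_header_spec : Claim_equal_format_table_header := by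
  intro s _
  unfold Spec_format_table_header format_table_header format_table_header_alt
  rw [fthLoopA_eq, consFirst_nil _ (by simpa using splitOn_ne_nil s.toList)]
  simp only [List.nil_append, emitP, dropTrail_map, List.map_map]
  simp [dropTrail, Function.comp_def]
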